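-- pv_equiv track=rewrite | github.com/IrrinaShim/AlgAlgebra2 | pollard.py | get_bk
-- ===== SOURCE A (Python) =====
-- def get_bk(a, k, n):
--     # вернёт (a ** w) % n
-- #    k = factorial(k)
--     k = bin(k)[2:][::-1]
--     s = 1
--     c = a
--     for i in range(len(k)):
--         if k[i] == '1':
--             s = (s * c) % n
--         c = (c * c) % n
--     s = s - 1
--     if (s < 0):
--         s = s + n
--     return s
-- ===== SOURCE B (Python) =====
-- def get_bk(a, k, n):
--     # (a ** k) % n - 1 adjusted into [0, n): recursive MSB-first square-and-multiply
--     def powmod(e):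
--         if e == 0:
--             return 1
--         t = powmod(e // 2)
--         t = (t * t) % n
--         if e % 2 == 1:
--             t = (t * a) % n
--         return t
--     s = powmod(k) - 1
--     if s < 0:
--         s = s + n
--     return s
-- ===== Notes on version B (the rewrite author's own statement) =====
-- stated objective: alternative
-- what changed: Replaces A's bin()-string construction and LSB-first loop over the reversed bit string with a recursive MSB-first square-and-multiply helper (powmod with e//2 recursion); same final -1/+n adjustment.
-- outside the precondition, e.g. on get_bk(2, -3, 7): A returns 0, B does not finish within the time limit
import Mathlib
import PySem

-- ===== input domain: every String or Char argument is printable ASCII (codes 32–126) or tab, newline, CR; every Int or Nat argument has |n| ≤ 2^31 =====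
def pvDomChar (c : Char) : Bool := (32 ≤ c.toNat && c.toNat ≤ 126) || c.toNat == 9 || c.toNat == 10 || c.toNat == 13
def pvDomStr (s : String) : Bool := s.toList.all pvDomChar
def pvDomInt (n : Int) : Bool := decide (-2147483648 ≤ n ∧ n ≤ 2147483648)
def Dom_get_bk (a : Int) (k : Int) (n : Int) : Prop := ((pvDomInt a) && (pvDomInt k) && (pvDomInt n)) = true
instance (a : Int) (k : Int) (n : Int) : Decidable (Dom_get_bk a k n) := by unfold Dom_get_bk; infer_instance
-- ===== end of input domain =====

-- B replaces A's reversed-bin()-string walk by a recursive square-and-multiply powmod (alternative decomposition, same cost).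

-- ===== PORT A =====
-- bin(m)[2:][::-1] for m > 0: the binary digits of m, least-significant first
def pvBitsPos : Nat → List Char
  | 0 => []
  | m + 1 => (if (m + 1) % 2 = 1 then '1' else '0') :: pvBitsPos ((m + 1) / 2)
decreasing_by omega

-- bin(k)[2:][::-1] for any k (for k < 0 Python's '-0b…'[2:] keeps the 'b', reversed it ends the string)
def pvBinRev (k : Int) : List Char :=
  if k = 0 then ['0']
  else pvBitsPos k.natAbs ++ (if k < 0 then ['b'] else [])

def pvStepA (n : Int) (p : Int × Int) (ch : Char) : Int × Int :=
  ((if ch = '1' then PySem.Int.mod (p.1 * p.2) n else p.1), PySem.Int.mod (p.2 * p.2) n)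

def get_bk (a : Int) (k : Int) (n : Int) : Int :=
  let bits := pvBinRev k
  let sc := bits.foldl (pvStepA n) (1, a)
  let s := sc.1 - 1
  if s < 0 then s + n else s

-- ===== PORT B =====
-- Source B's powmod(e); recursion over e.toNat mirrors the Python recursion, exact for e ≥ 0 (Pre_)
def pvPowmod (a : Int) (n : Int) : Nat → Int
  | 0 => 1
  | m + 1 =>
    let t := pvPowmod a n ((m + 1) / 2)
    let t := PySem.Int.mod (t * t) n
    if (m + 1) % 2 = 1 then PySem.Int.mod (t * a) n else t
decreasing_by omega

def get_bk_alt (a : Int) (k : Int) (n : Int) : Int :=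
  let s := pvPowmod a n k.toNat - 1
  if s < 0 then s + n else s

-- ===== PRECONDITION & SPEC =====
-- Pre_ excludes n = 0, where A raises ZeroDivisionError, and k < 0, where A's bin()-string walk
-- accidentally skips the '-'/'b' characters and returns the value for |k| while B's natural
-- recursion (e // 2) does not terminate.
def Pre_get_bk (a : Int) (k : Int) (n : Int) : Prop := 0 ≤ k ∧ n ≠ 0
instance (a : Int) (k : Int) (n : Int) : Decidable (Pre_get_bk a k n) := by unfold Pre_get_bk; infer_instance
def pvWitness_get_bk : Int × Int × Int := (3, 5, 7)

def Spec_get_bk (a : Int) (k : Int) (n : Int) (out : Int) : Prop := out = get_bk_alt a k n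
instance (a : Int) (k : Int) (n : Int) (out : Int) : Decidable (Spec_get_bk a k n out) := by unfold Spec_get_bk; infer_instance

-- ===== CLAIM (what is proved, stated in full; the proofs are below) =====
def Claim_equal_get_bk : Prop := ∀ (a : Int) (k : Int) (n : Int), Dom_get_bk a k n → Pre_get_bk a k n → Spec_get_bk a k n (get_bk a k n)

-- ===== LEMMAS AND PROOFS =====

-- Python % respects congruence mod n (n ≠ 0)
theorem pymod_congr {n x y : Int} (hn : n ≠ 0) (h : n ∣ x - y) :
    PySem.Int.mod x n = PySem.Int.mod y n := by
  have hx := PySem.Int.floordiv_mul_add_mod x n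
  have hy := PySem.Int.floordiv_mul_add_mod y n
  have hd : n ∣ PySem.Int.mod x n - PySem.Int.mod y n := by
    have he : PySem.Int.mod x n - PySem.Int.mod y n
        = (x - y) - (PySem.Int.floordiv x n - PySem.Int.floordiv y n) * n := by
      ring_nf
      linarith [hx, hy]
    rw [he]
    exact dvd_sub h (dvd_mul_left n _)
  have hda : |n| ∣ PySem.Int.mod x n - PySem.Int.mod y n := (abs_dvd _ _).mpr hd
  rcases lt_trichotomy n 0 with hneg | hz | hpos
  · have bx := PySem.Int.mod_neg_bounds (a := x) hneg
    have by' := PySem.Int.mod_neg_bounds (a := y) hneg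
    have habs : |PySem.Int.mod x n - PySem.Int.mod y n| < |n| := by
      rw [abs_of_neg hneg, abs_sub_lt_iff]
      omega
    have := Int.eq_zero_of_abs_lt_dvd hda habs
    omega
  · exact absurd hz hn
  · have bx1 := PySem.Int.mod_nonneg (a := x) hpos
    have bx2 := PySem.Int.mod_lt (a := x) hpos
    have by1 := PySem.Int.mod_nonneg (a := y) hpos
    have by2 := PySem.Int.mod_lt (a := y) hpos
    have habs : |PySem.Int.mod x n - PySem.Int.mod y n| < |n| := by
      rw [abs_of_pos hpos, abs_sub_lt_iff]
      omega
    have := Int.eq_zero_of_abs_lt_dvd hda habs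
    omega

theorem pymod_self_sub {n x : Int} : n ∣ x - PySem.Int.mod x n := by
  have h := PySem.Int.floordiv_mul_add_mod x n
  exact ⟨PySem.Int.floordiv x n, by linarith [h]⟩

theorem pymod_mul_left {n x y : Int} (hn : n ≠ 0) :
    PySem.Int.mod (PySem.Int.mod x n * y) n = PySem.Int.mod (x * y) n := by
  refine pymod_congr hn ?_
  have he : PySem.Int.mod x n * y - x * y = (PySem.Int.mod x n - x) * y := by ring
  rw [he]
  exact (dvd_sub_comm.mp pymod_self_sub).mul_right y

theorem pymod_mul_pow {n x y : Int} (hn : n ≠ 0) (e : Nat) :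
    PySem.Int.mod (y * (PySem.Int.mod x n) ^ e) n = PySem.Int.mod (y * x ^ e) n := by
  refine pymod_congr hn ?_
  have h1 : n ∣ (PySem.Int.mod x n) ^ e - x ^ e :=
    dvd_trans (dvd_sub_comm.mp pymod_self_sub) (sub_dvd_pow_sub_pow _ _ e)
  have he : y * (PySem.Int.mod x n) ^ e - y * x ^ e = ((PySem.Int.mod x n) ^ e - x ^ e) * y := by
    ring
  rw [he]
  exact h1.mul_right y

-- A's loop over the LSB-first bits of m (m ≥ 1) computes (s * c^m) % n in its first component
theorem foldA_spec {n : Int} (hn : n ≠ 0) :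
    ∀ m : Nat, 1 ≤ m → ∀ s c : Int,
      ((pvBitsPos m).foldl (pvStepA n) (s, c)).1 = PySem.Int.mod (s * c ^ m) n := by
  intro m
  induction m using Nat.strong_induction_on with
  | _ m ih =>
    intro hm s c
    match m, hm with
    | m' + 1, _ =>
      rw [pvBitsPos]
      simp only [List.foldl_cons, pvStepA]
      by_cases h2 : (m' + 1) / 2 = 0
      · have hm0 : m' = 0 := by omega
        subst hm0
        simp [pvBitsPos, pow_one]
      · rw [ih ((m' + 1) / 2) (by omega) (by omega)]
        obtain ⟨e, he⟩ : ∃ e, (m' + 1) / 2 = e := ⟨_, rfl⟩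
        rw [he]
        by_cases hodd : (m' + 1) % 2 = 1
        · rw [if_pos hodd, if_pos rfl, pymod_mul_left hn, pymod_mul_pow hn]
          congr 1
          rw [show m' + 1 = e + e + 1 by omega]
          ring
        · rw [if_neg hodd, if_neg (by decide : ¬ (('0' : Char) = '1')), pymod_mul_pow hn]
          congr 1
          rw [show m' + 1 = e + e by omega]
          ring

theorem pymod_mul_mod_mod {n x y : Int} (hn : n ≠ 0) :
    PySem.Int.mod (PySem.Int.mod x n * PySem.Int.mod y n) n = PySem.Int.mod (x * y) n := by
  rw [pymod_mul_left hn, mul_comm x (PySem.Int.mod y n), pymod_mul_left hn, mul_comm y x]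

-- B's recursion computes a^m % n for m ≥ 1
theorem powmod_spec {a n : Int} (hn : n ≠ 0) :
    ∀ m : Nat, 1 ≤ m → pvPowmod a n m = PySem.Int.mod (a ^ m) n := by
  intro m
  induction m using Nat.strong_induction_on with
  | _ m ih =>
    intro hm
    match m, hm with
    | m' + 1, _ =>
      rw [pvPowmod]
      by_cases h2 : (m' + 1) / 2 = 0
      · have hm0 : m' = 0 := by omega
        subst hm0
        have h1 : pvPowmod a n ((0 + 1) / 2) = 1 := by
          norm_num [pvPowmod]
        rw [h1, one_mul, if_pos (by norm_num : (0 + 1) % 2 = 1), pymod_mul_left hn, one_mul]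
        norm_num
      · rw [ih ((m' + 1) / 2) (by omega) (by omega)]
        obtain ⟨e, he⟩ : ∃ e, (m' + 1) / 2 = e := ⟨_, rfl⟩
        rw [he, pymod_mul_mod_mod hn]
        by_cases hodd : (m' + 1) % 2 = 1
        · rw [if_pos hodd, pymod_mul_left hn]
          congr 1
          rw [show m' + 1 = e + e + 1 by omega]
          ring
        · rw [if_neg hodd]
          congr 1
          rw [show m' + 1 = e + e by omega]
          ring

-- ===== VERDICT (by name: the statement is the Claim_ definition above) =====
theorem get_bk_spec : Claim_equal_get_bk := by
  intro a k n _ hpre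
  obtain ⟨hk, hn⟩ := hpre
  unfold Spec_get_bk
  by_cases hk0 : k = 0
  · subst hk0
    simp [get_bk, get_bk_alt, pvBinRev, pvStepA, pvPowmod]
  · have hna : 1 ≤ k.natAbs := by omega
    have hbin : pvBinRev k = pvBitsPos k.natAbs := by
      unfold pvBinRev
      rw [if_neg hk0, if_neg (by omega : ¬ k < 0)]
      simp
    simp only [get_bk, get_bk_alt, hbin]
    rw [foldA_spec hn k.natAbs hna 1 a, powmod_spec hn k.toNat (by omega),
        show k.toNat = k.natAbs by omega, one_mul]
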